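-- pv_equiv track=rewrite | github.com/tzyl/hackerrank-python | goldman_sachs_codesprint/buy_maximum_stocks.py | buy_maximum_stocks
-- ===== SOURCE A (Python) =====
-- def buy_maximum_stocks(n, k, A):
--     # Calculate the number of stocks available at each price.
--     price_to_available = {}
--     for i, price in enumerate(A, 1):
--         if price not in price_to_available:
--             price_to_available[price] = 0
--         price_to_available[price] += i
--     # Greedily buy as many as possible at the cheapest price.
--     current_funds = k
--     number_of_stocks = 0
--     for price in sorted(set(A)):
--         number_available = price_to_available[price]
--         number_possible = current_funds // price
--         number_bought = min(number_available, number_possible)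
--         current_funds -= number_bought * price
--         number_of_stocks += number_bought
--     return number_of_stocks
-- ===== SOURCE B (Python) =====
-- def buy_maximum_stocks(n, k, A):
--     # Divide and conquer instead of dict + sort: partition the (quantity, price)
--     # pairs around a pivot price, buy recursively at the cheaper prices first,
--     # then at the pivot price, then recursively at the more expensive ones.
--     def solve(pairs, funds):
--         if not pairs:
--             return 0, funds
--         pivot = pairs[len(pairs) // 2][1]
--         low = [q for q in pairs if q[1] < pivot]
--         eq_avail = sum(i for i, price in pairs if price == pivot)
--         high = [q for q in pairs if q[1] > pivot]
--         b1, funds = solve(low, funds)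
--         x = min(eq_avail, funds // pivot)
--         funds -= x * pivot
--         b2, funds = solve(high, funds)
--         return b1 + x + b2, funds
--
--     bought, _ = solve(list(enumerate(A, 1)), k)
--     return bought
-- ===== Notes on version B (the rewrite author's own statement) =====
-- stated objective: alternative
-- what changed: Drops both the price->quantity dict and the sort: B is a quicksort-style divide and conquer that partitions the (quantity, price) pairs around a pivot price and recursively buys at the cheaper side, the pivot price, then the expensive side.
import Mathlib
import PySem

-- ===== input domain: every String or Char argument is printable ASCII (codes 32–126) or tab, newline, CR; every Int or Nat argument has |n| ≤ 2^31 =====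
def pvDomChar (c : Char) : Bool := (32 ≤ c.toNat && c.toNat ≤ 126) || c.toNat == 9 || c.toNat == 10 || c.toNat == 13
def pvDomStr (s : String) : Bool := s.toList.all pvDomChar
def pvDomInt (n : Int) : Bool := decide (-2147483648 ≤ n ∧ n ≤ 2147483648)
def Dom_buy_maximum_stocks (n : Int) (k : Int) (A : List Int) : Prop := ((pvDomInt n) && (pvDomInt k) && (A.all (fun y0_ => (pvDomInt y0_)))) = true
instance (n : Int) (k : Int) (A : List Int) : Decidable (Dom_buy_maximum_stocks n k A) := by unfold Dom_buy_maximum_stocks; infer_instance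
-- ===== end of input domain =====

-- B drops A's price->quantity dict and the sort: a quicksort-style divide and conquer
-- that partitions the pairs around a pivot price and buys cheap side, pivot, expensive
-- side (alternative decomposition, no speed claim); proved equal on inputs without a 0 price.


-- ===== PORT A =====
-- loop body of A's dict-building pass: 'if price not in d: d[price] = 0' then 'd[price] += i'
-- (q = (i, price) from enumerate(A, 1); after the guard the key is present, so getD is exact)
def pvBuildStep (d : PySem.Dict Int Int) (q : Int × Int) : PySem.Dict Int Int :=
  let d := if d.contains q.2 then d else d.insert q.2 0
  d.insert q.2 (d.getD q.2 0 + q.1)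

-- loop body of A's buying pass over sorted(set(A)); 'price_to_available[price]' has its key
-- always present (every price in set(A) was inserted), so getD is exact there
def pvAStep (d : PySem.Dict Int Int) (s : Int × Int) (price : Int) : Int × Int :=
  let number_available := d.getD price 0
  let number_possible := PySem.Int.floordiv s.1 price
  let number_bought := min number_available number_possible
  (s.1 - number_bought * price, s.2 + number_bought)

def buy_maximum_stocks (n : Int) (k : Int) (A : List Int) : Int :=
  let price_to_available := (PySem.List.enumerate A 1).foldl pvBuildStep PySem.Dict.empty
  let r := (PySem.List.sorted (PySem.Set.ofList A) (fun x => x) false).foldl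
             (pvAStep price_to_available) (k, 0)
  r.2

-- ===== PORT B =====
-- B's recursive helper 'solve(pairs, funds) -> (bought, funds)': pivot = middle
-- element's price (pairs[len(pairs)//2][1]), recurse on the cheaper partition,
-- buy at the pivot price, recurse on the more expensive partition
def pvSolve (pairs : List (Int × Int)) (funds : Int) : Int × Int :=
  if hne : pairs = [] then (0, funds)
  else
    let pivot := (pairs[pairs.length / 2]'(Nat.div_lt_self
      (List.length_pos_iff.mpr hne) one_lt_two)).2
    let low := pairs.filter (fun q => q.2 < pivot)
    let eq_avail := ((pairs.filter (fun q => q.2 == pivot)).map (fun q => q.1)).sum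
    let high := pairs.filter (fun q => pivot < q.2)
    let r1 := pvSolve low funds
    let x := min eq_avail (PySem.Int.floordiv r1.2 pivot)
    let r2 := pvSolve high (r1.2 - x * pivot)
    (r1.1 + x + r2.1, r2.2)
termination_by pairs.length
decreasing_by
  -- the middle element itself (price = pivot) is dropped by either partition
  all_goals
    rw [List.length_unattach]
    exact lt_of_lt_of_eq
      (List.length_filter_lt_length_iff_exists.mpr
        ⟨⟨pairs[pairs.length / 2]'(Nat.div_lt_self (List.length_pos_iff.mpr hne) one_lt_two),
            List.getElem_mem _⟩,
          List.mem_attach _ _, by simp⟩)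
      (by simp)

def buy_maximum_stocks_alt (n : Int) (k : Int) (A : List Int) : Int :=
  (pvSolve (PySem.List.enumerate A 1) k).1

-- ===== PRECONDITION & SPEC =====
-- Pre_ excludes exactly the inputs with a price 0 in A, on which 'funds // price'
-- raises ZeroDivisionError in A (B raises there too).
def Pre_buy_maximum_stocks (n : Int) (k : Int) (A : List Int) : Prop := (0 : Int) ∉ A
instance (n : Int) (k : Int) (A : List Int) : Decidable (Pre_buy_maximum_stocks n k A) := by unfold Pre_buy_maximum_stocks; infer_instance
def pvWitness_buy_maximum_stocks : Int × Int × List Int := (3, 10, [2, 3, 2])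

def Spec_buy_maximum_stocks (n : Int) (k : Int) (A : List Int) (out : Int) : Prop := out = buy_maximum_stocks_alt n k A
instance (n : Int) (k : Int) (A : List Int) (out : Int) : Decidable (Spec_buy_maximum_stocks n k A out) := by unfold Spec_buy_maximum_stocks; infer_instance

-- ===== CLAIM (what is proved, stated in full; the proofs are below) =====
def Claim_equal_buy_maximum_stocks : Prop := ∀ (n : Int) (k : Int) (A : List Int), Dom_buy_maximum_stocks n k A → Pre_buy_maximum_stocks n k A → Spec_buy_maximum_stocks n k A (buy_maximum_stocks n k A)

-- ===== LEMMAS AND PROOFS =====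

theorem pvBuildStep_getD (d : PySem.Dict Int Int) (q : Int × Int) (p : Int) :
    (pvBuildStep d q).getD p 0 = d.getD p 0 + (if q.2 = p then q.1 else 0) := by
  obtain ⟨i, price⟩ := q
  unfold pvBuildStep
  by_cases hc : d.contains price
  · by_cases h : p = price <;>
      simp [hc, h, PySem.Dict.getD_insert, eq_comm]
  · have hnc : d.getD price 0 = 0 :=
      PySem.Dict.getD_of_not_contains _ _ (by simpa using hc)
    by_cases h : p = price <;>
      simp [hc, h, PySem.Dict.getD_insert, eq_comm, hnc]

-- dict lookup after A's building loop: the sum of the enumerate indices at that price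
theorem pvBuild_getD (l : List (Int × Int)) (d : PySem.Dict Int Int) (p : Int) :
    (l.foldl pvBuildStep d).getD p 0
      = d.getD p 0 + ((l.filter (fun q => q.2 == p)).map (fun q => q.1)).sum := by
  induction l generalizing d with
  | nil => simp
  | cons q t ih =>
    simp only [List.foldl_cons, ih, pvBuildStep_getD, List.filter_cons]
    by_cases h : q.2 = p
    · simp [h]; ring
    · simp [h]

-- A's fold threads funds independently of the bought accumulator
theorem pvAStep_shift (d : PySem.Dict Int Int) (ks : List Int) (f b : Int) :
    ks.foldl (pvAStep d) (f, b)
      = ((ks.foldl (pvAStep d) (f, 0)).1, b + (ks.foldl (pvAStep d) (f, 0)).2) := by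
  induction ks generalizing f b with
  | nil => simp
  | cons k t ih =>
    simp only [List.foldl_cons]
    rw [show pvAStep d (f, b) k
        = ((pvAStep d (f, 0) k).1, b + (pvAStep d (f, 0) k).2) from by
      simp [pvAStep]]
    rw [ih, ih (pvAStep d (f, 0) k).1 (pvAStep d (f, 0) k).2]
    simp [add_assoc]

-- a strictly sorted list splits at any of its members into the strictly smaller
-- part, the member, and the strictly larger part
theorem pvKs_split (ks : List Int) (p : Int)
    (hks : ks.Pairwise (· < ·)) (hp : p ∈ ks) :
    ks = ks.filter (fun x => x < p) ++ p :: ks.filter (fun x => p < x) := by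
  induction ks with
  | nil => simp at hp
  | cons h t ih =>
    have hlt : ∀ y ∈ t, h < y := (List.pairwise_cons.mp hks).1
    have hkt : t.Pairwise (· < ·) := (List.pairwise_cons.mp hks).2
    by_cases hhp : h = p
    · subst hhp
      have h1 : t.filter (fun x => x < h) = [] := by
        apply List.filter_eq_nil_iff.mpr
        intro y hy
        have := hlt y hy
        simp; omega
      have h2 : t.filter (fun x => h < x) = t := by
        apply List.filter_eq_self.mpr
        intro y hy
        have := hlt y hy
        simp; omega
      rw [List.filter_cons, List.filter_cons, h1, h2]
      simp
    · have hpt : p ∈ t := by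
        rcases List.mem_cons.mp hp with h' | h'
        · exact absurd h'.symm hhp
        · exact h'
      have hhltp : h < p := hlt p hpt
      have hnp : ¬ p < h := by omega
      simp only [List.filter_cons, show decide (h < p) = true by simp [hhltp],
        show decide (p < h) = false by simp [hnp], Bool.false_eq_true, if_false,
        if_true, List.cons_append]
      rw [← ih hkt hpt]

-- main invariant: B's divide and conquer over pairs whose prices are exactly the
-- strictly sorted key list ks computes A's fold over ks with the dict lookups,
-- returning (bought, final funds)
theorem pvSolve_eq (d : PySem.Dict Int Int) (N : Nat) :
    ∀ (pairs : List (Int × Int)) (ks : List Int) (f : Int),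
      pairs.length ≤ N →
      ks.Pairwise (· < ·) →
      (∀ q ∈ pairs, q.2 ∈ ks) →
      (∀ p ∈ ks, ∃ q ∈ pairs, q.2 = p) →
      (∀ p ∈ ks, d.getD p 0 = ((pairs.filter (fun q => q.2 == p)).map (fun q => q.1)).sum) →
      pvSolve pairs f = ((ks.foldl (pvAStep d) (f, 0)).2, (ks.foldl (pvAStep d) (f, 0)).1) := by
  induction N with
  | zero =>
    intro pairs ks f hN hks hsub hcov hd
    have hnil : pairs = [] := List.length_eq_zero_iff.mp (by omega)
    subst hnil
    have hks0 : ks = [] := by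
      cases ks with
      | nil => rfl
      | cons p t => obtain ⟨q, hq, _⟩ := hcov p (by simp); simp at hq
    subst hks0
    rw [pvSolve]
    simp
  | succ N ih =>
    intro pairs ks f hN hks hsub hcov hd
    by_cases hne : pairs = []
    · subst hne
      have hks0 : ks = [] := by
        cases ks with
        | nil => rfl
        | cons p t => obtain ⟨q, hq, _⟩ := hcov p (by simp); simp at hq
      subst hks0
      rw [pvSolve]
      simp
    · rw [pvSolve.eq_def]
      simp only [hne, dite_false]
      set pe := pairs[pairs.length / 2]'(Nat.div_lt_self
        (List.length_pos_iff.mpr hne) one_lt_two) with hpe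
      have hpemem : pe ∈ pairs := List.getElem_mem _
      have hpks : pe.2 ∈ ks := hsub pe hpemem
      -- split ks at the pivot price
      have hsplit := pvKs_split ks pe.2 hks hpks
      set ksl := ks.filter (fun x => x < pe.2) with hksl
      set ksh := ks.filter (fun x => pe.2 < x) with hksh
      have hmeml : ∀ x ∈ ksl, x ∈ ks ∧ x < pe.2 := by
        intro x hx
        have := List.mem_filter.mp hx
        exact ⟨this.1, by simpa using this.2⟩
      have hmemh : ∀ x ∈ ksh, x ∈ ks ∧ pe.2 < x := by
        intro x hx
        have := List.mem_filter.mp hx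
        exact ⟨this.1, by simpa using this.2⟩
      -- the recursive calls are covered by the induction hypothesis
      have hlen : ∀ (c : Int × Int → Bool), (∀ r, c r = true → ¬ r.2 = pe.2) →
          (pairs.filter c).length ≤ N := by
        intro c hc
        have : (pairs.filter c).length < pairs.length :=
          List.length_filter_lt_length_iff_exists.mpr
            ⟨pe, hpemem, by
              intro h
              exact hc pe h rfl⟩
        omega
      have hfleq : ∀ (c : Int × Int → Bool) (p : Int), (∀ r, r.2 = p → c r = true) →
          (pairs.filter c).filter (fun q => q.2 == p) = pairs.filter (fun q => q.2 == p) := by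
        intro c p hc
        rw [List.filter_filter]
        apply List.filter_congr
        intro q _
        by_cases h : q.2 = p
        · simp [h, hc q h]
        · simp [h]
      have ihlow := ih (pairs.filter (fun q => q.2 < pe.2)) ksl f
        (hlen _ (by intro r hr h; simp [h] at hr))
        (List.Pairwise.filter _ hks)
        (by
          intro q hq
          have h1 := List.mem_filter.mp hq
          rw [hksl]
          exact List.mem_filter.mpr ⟨hsub q h1.1, h1.2⟩)
        (by
          intro p hp
          obtain ⟨hpk, hplt⟩ := hmeml p hp
          obtain ⟨q, hq, hqp⟩ := hcov p hpk
          exact ⟨q, List.mem_filter.mpr ⟨hq, by simp [hqp, hplt]⟩, hqp⟩)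
        (by
          intro p hp
          obtain ⟨hpk, hplt⟩ := hmeml p hp
          rw [hfleq _ p (by intro r hr; simp [hr, hplt])]
          exact hd p hpk)
      -- compute with the split of ks
      rw [hsplit, List.foldl_append, List.foldl_cons]
      set s1 := ksl.foldl (pvAStep d) (f, 0) with hs1
      have hdgetD : ((pairs.filter (fun q => q.2 == pe.2)).map (fun q => q.1)).sum
          = d.getD pe.2 0 := (hd pe.2 hpks).symm
      rw [ihlow, hdgetD]
      set x := min (d.getD pe.2 0) (PySem.Int.floordiv s1.1 pe.2) with hx
      have hstep : pvAStep d s1 pe.2 = (s1.1 - x * pe.2, s1.2 + x) := by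
        simp [pvAStep, hx]
      have ihhigh := ih (pairs.filter (fun q => pe.2 < q.2)) ksh (s1.1 - x * pe.2)
        (hlen _ (by intro r hr h; simp [h] at hr))
        (List.Pairwise.filter _ hks)
        (by
          intro q hq
          have h1 := List.mem_filter.mp hq
          rw [hksh]
          exact List.mem_filter.mpr ⟨hsub q h1.1, h1.2⟩)
        (by
          intro p hp
          obtain ⟨hpk, hplt⟩ := hmemh p hp
          obtain ⟨q, hq, hqp⟩ := hcov p hpk
          exact ⟨q, List.mem_filter.mpr ⟨hq, by simp [hqp, hplt]⟩, hqp⟩)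
        (by
          intro p hp
          obtain ⟨hpk, hplt⟩ := hmemh p hp
          rw [hfleq _ p (by intro r hr; simp [hr, hplt])]
          exact hd p hpk)
      rw [ihhigh, hstep]
      rw [pvAStep_shift d ksh (s1.1 - x * pe.2) (s1.2 + x)]

-- ===== VERDICT (by name: the statement is the Claim_ definition above) =====
theorem buy_maximum_stocks_spec : Claim_equal_buy_maximum_stocks := by
  intro n k A _hdom _hpre
  show buy_maximum_stocks n k A = buy_maximum_stocks_alt n k A
  simp only [buy_maximum_stocks, buy_maximum_stocks_alt]
  set pairs := PySem.List.enumerate A 1 with hpE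
  set ks := PySem.List.sorted (PySem.Set.ofList A) (fun x => x) false with hks
  set d := pairs.foldl pvBuildStep PySem.Dict.empty with hd
  have hmem : ∀ p : Int, p ∈ ks ↔ p ∈ A := by
    intro p
    rw [hks, PySem.List.mem_sorted, PySem.Set.mem_ofList]
  rw [pvSolve_eq d pairs.length pairs ks k (le_refl _)
    (PySem.List.sorted_ofList_pairwise_lt A)
    (by
      intro q hq
      obtain ⟨i, hi, rfl⟩ := (PySem.List.mem_enumerate_iff A 1 q).mp hq
      exact (hmem _).mpr (List.getElem_mem hi))
    (by
      intro p hp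
      obtain ⟨i, hi, rfl⟩ := List.mem_iff_getElem.mp ((hmem p).mp hp)
      exact ⟨((1 : Int) + i, A[i]), (PySem.List.mem_enumerate_iff A 1 _).mpr ⟨i, hi, rfl⟩, rfl⟩)
    (by
      intro p _
      rw [hd, pvBuild_getD]
      simp)]
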